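-- pv_equiv track=rewrite | github.com/lesnerd/Python | jump_game.py | dfs
-- ===== SOURCE A (Python) =====
-- def dfs(arr, i, memo):
--     if i < 0 or i >= len(arr):
--         return False
--     if arr[i] == 0:
--         return True
--     if i in memo:
--         return memo[i]
--     memo[i] = False
--     if dfs(arr, i - arr[i], memo):
--         return True
--     if dfs(arr, i + arr[i], memo):
--          return True
--     return False
-- ===== SOURCE B (Python) =====
-- def dfs(arr, i, memo):
--     stack = [i]
--     while stack:
--         j = stack.pop()
--         if j < 0 or j >= len(arr):
--             continue
--         if arr[j] == 0:
--             return True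
--         if j in memo:
--             if memo[j]:
--                 return True
--             continue
--         memo[j] = False
--         stack.append(j + arr[j])
--         stack.append(j - arr[j])
--     return False
-- ===== Notes on version B (the rewrite author's own statement) =====
-- stated objective: alternative
-- what changed: The memoized recursive DFS is replaced by an iterative loop over an explicit stack (pop j, apply the same guards, mark memo[j]=False, push j+arr[j] then j-arr[j]), returning True when a zero cell is reached and False when the stack empties; no recursion is used.
import Mathlib
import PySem

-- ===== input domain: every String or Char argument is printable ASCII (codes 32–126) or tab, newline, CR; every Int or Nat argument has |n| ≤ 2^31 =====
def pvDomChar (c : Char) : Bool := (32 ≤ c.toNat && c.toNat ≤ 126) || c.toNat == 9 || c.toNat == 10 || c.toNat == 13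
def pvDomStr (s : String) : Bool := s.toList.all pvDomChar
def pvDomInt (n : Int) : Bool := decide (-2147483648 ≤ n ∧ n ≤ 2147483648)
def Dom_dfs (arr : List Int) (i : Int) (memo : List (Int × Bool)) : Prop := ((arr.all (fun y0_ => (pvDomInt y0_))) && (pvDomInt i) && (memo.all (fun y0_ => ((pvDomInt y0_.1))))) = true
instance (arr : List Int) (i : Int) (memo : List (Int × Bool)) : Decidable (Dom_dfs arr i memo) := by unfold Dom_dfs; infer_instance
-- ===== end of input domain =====

-- B replaces A's memoized recursive DFS by an iterative explicit-stack loop (alternative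
-- decomposition, same visit order). Both Pythons mutate `memo` in place; the equivalence
-- proved here is about the RETURN value only.

-- ===== PORT A =====
-- Transliteration of A's recursion, carrying the mutated memo dict explicitly.
-- The fuel parameter only totalizes the recursion: each level that recurses first inserts a
-- fresh in-range key into memo, so arr.length + 1 levels always suffice (proved below).
def dfsM (arr : List Int) : Nat → Int → PySem.Dict Int Bool → Bool × PySem.Dict Int Bool
  | 0, _, memo => (false, memo)   -- never reached when fuel > number of in-range keys missing from memo
  | fuel+1, i, memo =>
    if i < 0 ∨ (arr.length : Int) ≤ i then (false, memo)
    else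
      -- the guard ensures the index is in range, so getD 0 is exact for arr[i]
      let a := (PySem.List.pyGet? arr i).getD 0
      if a = 0 then (true, memo)
      else
        match memo.get? i with
        | some b => (b, memo)
        | none =>
          let m1 := memo.insert i false
          let r1 := dfsM arr fuel (i - a) m1
          if r1.1 then (true, r1.2)
          else
            let r2 := dfsM arr fuel (i + a) r1.2
            if r2.1 then (true, r2.2) else (false, r2.2)

def dfs (arr : List Int) (i : Int) (memo : List (Int × Bool)) : Bool :=
  (dfsM arr (arr.length + 1) i (PySem.Dict.mk memo)).1

-- ===== PORT B =====
-- Number of in-range indices not yet keyed in memo: the loop's termination measure.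
def muB (arr : List Int) (memo : PySem.Dict Int Bool) : Nat :=
  ((List.range arr.length).filter (fun k => !(memo.contains (Int.ofNat k)))).length

theorem muB_insert_lt (arr : List Int) (memo : PySem.Dict Int Bool) (j : Int)
    (h0 : ¬(j < 0 ∨ (arr.length : Int) ≤ j)) (hn : memo.get? j = none) :
    muB arr (memo.insert j false) < muB arr memo := by
  have hj0 : 0 ≤ j := by omega
  have hjl : j < (arr.length : Int) := by omega
  have hcont : memo.contains j = false := by
    rw [PySem.Dict.contains_eq_isSome_get?, hn]; rfl
  have hcast : Int.ofNat j.toNat = j := Int.toNat_of_nonneg hj0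
  have hmem : j.toNat ∈ (List.range arr.length).filter
      (fun k => !(memo.contains (Int.ofNat k))) := by
    apply List.mem_filter.mpr
    have hjm : j.toNat ∈ List.range arr.length := by
      rw [List.mem_range]
      omega
    refine ⟨hjm, ?_⟩
    show (!(memo.contains (Int.ofNat j.toNat))) = true
    rw [hcast, hcont]
    rfl
  unfold muB
  have hsub : (List.range arr.length).filter
        (fun k => !((memo.insert j false).contains (Int.ofNat k)))
      = ((List.range arr.length).filter
          (fun k => !(memo.contains (Int.ofNat k)))).filter (fun k => !(Int.ofNat k == j)) := by
    rw [List.filter_filter]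
    apply List.filter_congr
    intro k _
    rw [PySem.Dict.contains_insert]
    cases hkj : (Int.ofNat k == j) <;> cases hk : memo.contains (Int.ofNat k) <;> simp [hkj, hk]
  rw [hsub]
  apply List.length_filter_lt_length_iff_exists.mpr
  refine ⟨j.toNat, hmem, ?_⟩
  show ¬((!(Int.ofNat j.toNat == j)) = true)
  rw [hcast]
  simp

-- Transliteration of B's while-loop over the explicit stack.
def loopB (arr : List Int) : List Int → PySem.Dict Int Bool → Bool
  | [], _ => false
  | j :: st, memo =>
    if h0 : j < 0 ∨ (arr.length : Int) ≤ j then loopB arr st memo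
    else
      let a := (PySem.List.pyGet? arr j).getD 0
      if a = 0 then true
      else
        match hm : memo.get? j with
        | some b => if b then true else loopB arr st memo
        | none => loopB arr ((j - a) :: (j + a) :: st) (memo.insert j false)
  termination_by st memo => 3 * muB arr memo + st.length
  decreasing_by
  · simp only [List.length_cons]; omega
  · simp only [List.length_cons]; omega
  · have := muB_insert_lt arr memo j h0 hm
    simp only [List.length_cons]
    omega

def dfs_alt (arr : List Int) (i : Int) (memo : List (Int × Bool)) : Bool :=
  loopB arr [i] (PySem.Dict.mk memo)

-- ===== PRECONDITION & SPEC =====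
def Spec_dfs (arr : List Int) (i : Int) (memo : List (Int × Bool)) (out : Bool) : Prop := out = dfs_alt arr i memo
instance (arr : List Int) (i : Int) (memo : List (Int × Bool)) (out : Bool) : Decidable (Spec_dfs arr i memo out) := by unfold Spec_dfs; infer_instance

-- ===== CLAIM (what is proved, stated in full; the proofs are below) =====
def Claim_equal_dfs : Prop := ∀ (arr : List Int) (i : Int) (memo : List (Int × Bool)), Dom_dfs arr i memo → Spec_dfs arr i memo (dfs arr i memo)

-- ===== LEMMAS AND PROOFS =====

theorem pv_length_filter_mono {α : Type} {p q : α → Bool} :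
    ∀ (l : List α), (∀ a ∈ l, p a = true → q a = true) →
      (l.filter p).length ≤ (l.filter q).length := by
  intro l
  induction l with
  | nil => intro _; simp
  | cons a t ih =>
    intro h
    have ht := ih (fun x hx => h x (List.mem_cons_of_mem a hx))
    simp only [List.filter_cons]
    cases hp : p a
    · cases hq : q a <;> simp <;> omega
    · have : q a = true := h a List.mem_cons_self hp
      simp [this]
      omega

-- dfsM never removes keys from memo.
theorem dfsM_contains_mono (arr : List Int) (fuel : Nat) :
    ∀ (i : Int) (memo : PySem.Dict Int Bool) (k : Int),
      memo.contains k = true → ((dfsM arr fuel i memo).2).contains k = true := by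
  induction fuel with
  | zero => intro i memo k h; simpa [dfsM] using h
  | succ fuel ih =>
    intro i memo k h
    simp only [dfsM]
    split
    · exact h
    · split
      · exact h
      · split
        · exact h
        · have h1 : (memo.insert i false).contains k = true := by
            simp [PySem.Dict.contains_insert, h]
          have h2 := ih (i - (PySem.List.pyGet? arr i).getD 0) (memo.insert i false) k h1
          split
          · exact h2
          · have h3 := ih (i + (PySem.List.pyGet? arr i).getD 0) _ k h2
            split <;> exact h3

theorem muB_dfsM_le (arr : List Int) (fuel : Nat) (i : Int) (memo : PySem.Dict Int Bool) :
    muB arr (dfsM arr fuel i memo).2 ≤ muB arr memo := by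
  unfold muB
  apply pv_length_filter_mono
  intro k _ hk
  by_contra hc
  have hmc : memo.contains k = true := by
    cases h : memo.contains k
    · exact absurd h (by simpa [h] using hc)
    · rfl
  have := dfsM_contains_mono arr fuel i memo k hmc
  simp [this] at hk

-- Bridge: running B's loop with j on top of the stack behaves like one recursive call of A.
theorem loopB_dfsM (arr : List Int) (fuel : Nat) :
    ∀ (i : Int) (memo : PySem.Dict Int Bool) (st : List Int), muB arr memo < fuel →
      loopB arr (i :: st) memo
        = (if (dfsM arr fuel i memo).1 then true else loopB arr st (dfsM arr fuel i memo).2) := by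
  induction fuel with
  | zero => intro i memo st h; omega
  | succ fuel ih =>
    intro i memo st h
    rw [loopB]
    simp only [dfsM]
    by_cases h0 : i < 0 ∨ (arr.length : Int) ≤ i
    · simp [h0]
    · simp only [dif_neg h0, if_neg h0]
      by_cases ha : (PySem.List.pyGet? arr i).getD 0 = 0
      · simp [ha]
      · simp only [if_neg ha]
        cases hmm : memo.get? i with
        | some b =>
          cases b <;> simp
        | none =>
          have hlt := muB_insert_lt arr memo i h0 hmm
          have h1 : muB arr (memo.insert i false) < fuel := by omega
          rw [ih _ _ _ h1]
          cases hb1 : (dfsM arr fuel (i - (PySem.List.pyGet? arr i).getD 0)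
              (memo.insert i false)).1 with
          | true => simp [hb1]
          | false =>
            simp only [hb1, Bool.false_eq_true, if_false]
            have h2 : muB arr (dfsM arr fuel (i - (PySem.List.pyGet? arr i).getD 0)
                (memo.insert i false)).2 < fuel := by
              have := muB_dfsM_le arr fuel (i - (PySem.List.pyGet? arr i).getD 0)
                (memo.insert i false)
              omega
            rw [ih _ _ _ h2]
            cases hb2 : (dfsM arr fuel (i + (PySem.List.pyGet? arr i).getD 0)
                (dfsM arr fuel (i - (PySem.List.pyGet? arr i).getD 0)
                  (memo.insert i false)).2).1 <;> simp [hb2]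

theorem muB_le_length (arr : List Int) (memo : PySem.Dict Int Bool) :
    muB arr memo ≤ arr.length := by
  unfold muB
  have h1 := List.length_filter_le (fun k => !(memo.contains (Int.ofNat k)))
    (List.range arr.length)
  simpa using h1

-- ===== VERDICT (by name: the statement is the Claim_ definition above) =====
theorem dfs_spec : Claim_equal_dfs := by
  intro arr i memo _
  unfold Spec_dfs dfs dfs_alt
  have h : muB arr (PySem.Dict.mk memo) < arr.length + 1 := by
    have := muB_le_length arr (PySem.Dict.mk memo)
    omega
  rw [loopB_dfsM arr (arr.length + 1) i (PySem.Dict.mk memo) [] h]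
  cases hr : (dfsM arr (arr.length + 1) i (PySem.Dict.mk memo)).1 <;> simp [hr, loopB]
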